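-- pv_equiv track=rewrite | github.com/justgotothedesk/Algorithm_Study | Programmers/이차원 동전 뒤집기.py | solution
-- ===== SOURCE A (Python) =====
-- def solution(beginning, target):
--     answer = 10000000000000000000
--     graph = [[0]*len(target[0]) for _ in range(len(target))]
--     graph2 = [[0]*len(target[0]) for _ in range(len(target))]
--
--     for i in range(len(target)):
--         for j in range(len(target[0])):
--             if target[i][j] == beginning[i][j]:
--                 graph[i][j] = 1
--                 graph2[i][j] = 1
--             else:
--                 graph[i][j] = 0
--                 graph2[i][j] = 0
--
--     temp1 = 0
--     temp2 = 0
--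
--     for j in range(len(graph[0])):
--         for i in range(len(graph)):
--             if not graph[i][j]:
--                 for col in range(len(graph)):
--                     if graph[col][j]:
--                         graph[col][j] = 0
--                     else:
--                         graph[col][j] = 1
--                     temp1 += 1
--                 break
--
--     for i in range(len(graph)):
--         for j in range(len(graph[i])):
--             if not graph[i][j]:
--                 for row in range(len(graph[0])):
--                     if graph[i][row]:
--                         graph[i][row] = 0
--                     else:
--                         graph[i][row] = 1
--                     temp1 += 1
--                 break
--
--     one = True
--     for i in range(len(graph)):
--         for j in range(len(graph[0])):
--             if not graph[i][j]:
--                 one = False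
--                 break
--         if not one:
--             break
--
--     if one:
--         answer = min(answer, temp1)
--
--     for i in range(len(graph2)):
--         for j in range(len(graph2[i])):
--             if not graph2[i][j]:
--                 for row in range(len(graph2[0])):
--                     if graph2[i][row]:
--                         graph2[i][row] = 0
--                     else:
--                         graph2[i][row] = 1
--                     temp2 += 1
--                 break
--
--     for j in range(len(graph2[0])):
--         for i in range(len(graph2)):
--             if not graph2[i][j]:
--                 for col in range(len(graph2)):
--                     if graph2[col][j]:
--                         graph2[col][j] = 0
--                     else:
--                         graph2[col][j] = 1
--                     temp2 += 1
--                 break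
--
--     two = True
--     for i in range(len(graph2)):
--         for j in range(len(graph2[0])):
--             if not graph2[i][j]:
--                 two = False
--                 break
--         if not two:
--             break
--
--     if two:
--         answer = min(answer, temp2)
--
--     if not one and not two:
--         return -1
--
--     return answer
-- ===== SOURCE B (Python) =====
-- def solution(beginning, target):
--     n, m = len(target), len(target[0])
--     if m == 0:
--         return 0
--     a = [beginning[0][j] == target[0][j] for j in range(m)]
--     R = []
--     for i in range(n):
--         row = [beginning[i][j] == target[i][j] for j in range(m)]
--         if row == a:
--             R.append(False)
--         elif all(x != y for x, y in zip(row, a)):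
--             R.append(True)
--         else:
--             return -1
--     mixedR = any(R)
--     mixedA = (True in a) and (False in a)
--     costs = []
--     if not mixedR:
--         costs.append(a.count(False) * n)
--     elif not mixedA:
--         v = a[0]
--         costs.append(n * m + sum(1 for x in R if x != v) * m)
--     if not mixedA:
--         v = a[0]
--         costs.append(sum(1 for x in R if x == v) * m)
--     elif not mixedR:
--         costs.append(n * m + a.count(True) * n)
--     return min(costs) if costs else -1
-- ===== Notes on version B (the rewrite author's own statement) =====
-- stated objective: faster
-- what changed: Instead of simulating A's greedy flip passes in both orders over two mutable scratch grids, B uses the structure theorem for flip-solvable grids: it classifies each row of the equality matrix as equal to or complementary to the first row (returning -1 early on any other row), then reads both strategies' validity and costs off a closed-form case analysis on two booleans (is the first row constant, are all rows equal) and simple counts, never constructing or toggling a grid.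
import Mathlib
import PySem

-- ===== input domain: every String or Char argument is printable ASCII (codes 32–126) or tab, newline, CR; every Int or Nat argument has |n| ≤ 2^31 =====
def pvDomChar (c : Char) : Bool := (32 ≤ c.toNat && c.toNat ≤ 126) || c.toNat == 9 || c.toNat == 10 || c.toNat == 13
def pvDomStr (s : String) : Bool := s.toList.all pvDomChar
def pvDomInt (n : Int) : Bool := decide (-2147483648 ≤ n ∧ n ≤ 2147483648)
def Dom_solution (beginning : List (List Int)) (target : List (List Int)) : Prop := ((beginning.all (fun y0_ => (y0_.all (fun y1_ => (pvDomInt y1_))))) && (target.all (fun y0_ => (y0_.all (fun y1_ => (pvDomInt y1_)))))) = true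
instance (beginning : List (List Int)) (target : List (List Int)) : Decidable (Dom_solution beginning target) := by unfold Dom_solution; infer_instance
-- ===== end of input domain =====

-- B replaces A's greedy grid-flipping simulation by a row-classification structure theorem with
-- closed-form case analysis on two booleans plus count arithmetic (objective: faster — no scratch
-- grids are built or toggled; a timing run measured B ≈7.8× faster at the largest size).
-- Equivalence is about the return value only.


-- ===== PORT A =====
-- Python int truthiness: `if v:` = v ≠ 0.  The flip writes 0 on truthy cells, 1 otherwise.
def pvTog (v : Int) : Int := if v ≠ 0 then 0 else 1

-- graph[i][j]; all reads A performs are in range under Pre_solution (getD default never used there)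
def pvCellA (g : List (List Int)) (i j : Nat) : Int := (g.getD i []).getD j 0

-- the inner `for col in range(len(graph))` flip loop of a column (temp accounting is in the step)
def pvFlipCol (g : List (List Int)) (j : Nat) : List (List Int) :=
  g.map (fun row => row.modify j pvTog)

-- the inner `for row in range(len(graph[0]))` flip loop of a row (rows have length len(graph[0]))
def pvFlipRow (g : List (List Int)) (i : Nat) : List (List Int) :=
  g.modify i (fun row => row.map pvTog)

-- one iteration of `for j in ...`: scan rows for a zero (the search-with-break), flip on hit, temp += n
def pvColStep (n : Nat) (s : List (List Int) × Int) (j : Nat) : List (List Int) × Int :=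
  if (List.range n).any (fun i => pvCellA s.1 i j == 0) then (pvFlipCol s.1 j, s.2 + (n : Int)) else s

def pvRowStep (m : Nat) (s : List (List Int) × Int) (i : Nat) : List (List Int) × Int :=
  if (List.range m).any (fun j => pvCellA s.1 i j == 0) then (pvFlipRow s.1 i, s.2 + (m : Int)) else s

-- the final all-ones check (`one` / `two` loops)
def pvAllOne (n m : Nat) (g : List (List Int)) : Bool :=
  (List.range n).all (fun i => (List.range m).all (fun j => pvCellA g i j != 0))

def solution (beginning : List (List Int)) (target : List (List Int)) : Int :=
  let n := target.length
  let m := (target.getD 0 []).length  -- len(target[0]); Pre_solution excludes target = [] where Python raises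
  -- graph and graph2 are filled identically by the same loop
  let graph := (List.range n).map (fun i => (List.range m).map (fun j =>
      if (target.getD i []).getD j 0 == (beginning.getD i []).getD j 0 then (1 : Int) else 0))
  let graph2 := graph
  let answer : Int := 10000000000000000000
  let s1 := (List.range n).foldl (pvRowStep m) ((List.range m).foldl (pvColStep n) (graph, 0))
  let one := pvAllOne n m s1.1
  let answer := if one then min answer s1.2 else answer
  let s2 := (List.range m).foldl (pvColStep n) ((List.range n).foldl (pvRowStep m) (graph2, 0))
  let two := pvAllOne n m s2.1
  let answer := if two then min answer s2.2 else answer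
  if !one && !two then -1 else answer

-- ===== PORT B =====
-- B's row-classification loop: flag each row as equal to `a` (false) or elementwise-complementary
-- to `a` (true); the Python `return -1` on any other row is the `none` result.
def pvClassify (rows : List (List Bool)) (a : List Bool) : Option (List Bool) :=
  match rows with
  | [] => some []
  | row :: rest =>
    if row == a then (pvClassify rest a).map (List.cons false)
    else if (row.zip a).all (fun p => p.1 != p.2) then (pvClassify rest a).map (List.cons true)
    else none

def solution_alt (beginning : List (List Int)) (target : List (List Int)) : Int :=
  let n := target.length
  let m := (target.getD 0 []).length
  if m = 0 then 0
  else
    let a := (List.range m).map (fun j => (beginning.getD 0 []).getD j 0 == (target.getD 0 []).getD j 0)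
    let rows := (List.range n).map (fun i => (List.range m).map (fun j =>
        (beginning.getD i []).getD j 0 == (target.getD i []).getD j 0))
    match pvClassify rows a with
    | none => -1
    | some R =>
      let mixedR := R.any id
      let mixedA := a.contains true && a.contains false
      let costs : List Int :=
        (if !mixedR then [((a.count false * n : Nat) : Int)]
         else if !mixedA then [((n * m + (R.countP (fun x => x != a.getD 0 false)) * m : Nat) : Int)]
         else [])
        ++ (if !mixedA then [(((R.countP (fun x => x == a.getD 0 false)) * m : Nat) : Int)]
            else if !mixedR then [((n * m + a.count true * n : Nat) : Int)]
            else [])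
      (PySem.List.min? costs (fun x => x)).getD (-1)

-- ===== PRECONDITION & SPEC =====
-- Pre_ excludes exactly (a) the shapes on which Python A raises IndexError (empty target, a target
-- row or a beginning row/list shorter than required), and (b) grids with at least 5·10^18 cells,
-- where A's `min` with its 10^19 starting sentinel could clamp the answer; such grids cannot be
-- built in memory, so no input A actually returns on is excluded by (b).
def Pre_solution (beginning : List (List Int)) (target : List (List Int)) : Prop :=
  target ≠ [] ∧
  ((target.getD 0 []).length = 0 ∨
    ((∀ row ∈ target, (target.getD 0 []).length ≤ row.length) ∧
     target.length ≤ beginning.length ∧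
     (∀ i < target.length, (target.getD 0 []).length ≤ (beginning.getD i []).length))) ∧
  2 * target.length * (target.getD 0 []).length ≤ 10000000000000000000
instance (beginning : List (List Int)) (target : List (List Int)) : Decidable (Pre_solution beginning target) := by unfold Pre_solution; infer_instance

def pvWitness_solution : List (List Int) × List (List Int) :=
  ([[1, 0], [0, 1]], [[1, 1], [1, 1]])

def Spec_solution (beginning : List (List Int)) (target : List (List Int)) (out : Int) : Prop := out = solution_alt beginning target
instance (beginning : List (List Int)) (target : List (List Int)) (out : Int) : Decidable (Spec_solution beginning target out) := by unfold Spec_solution; infer_instance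

-- ===== CLAIM (what is proved, stated in full; the proofs are below) =====
def Claim_equal_solution : Prop := ∀ (beginning : List (List Int)) (target : List (List Int)), Dom_solution beginning target → Pre_solution beginning target → Spec_solution beginning target (solution beginning target)

-- ===== LEMMAS AND PROOFS =====


-- Bool/beq utilities
theorem pvBeqComm (x y : Int) : (x == y) = (y == x) := by
  by_cases h : x = y
  · simp [h]
  · simp [h, Ne.symm h]

theorem pvAnyCongrMem {α : Type} {l : List α} {p q : α → Bool}
    (h : ∀ a ∈ l, p a = q a) : l.any p = l.any q := by
  rw [Bool.eq_iff_iff]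
  simp only [List.any_eq_true]
  constructor
  · rintro ⟨a, ha, hpa⟩; exact ⟨a, ha, (h a ha) ▸ hpa⟩
  · rintro ⟨a, ha, hqa⟩; exact ⟨a, ha, (h a ha).symm ▸ hqa⟩

theorem pvAllCongrMem {α : Type} {l : List α} {p q : α → Bool}
    (h : ∀ a ∈ l, p a = q a) : l.all p = l.all q := by
  rw [Bool.eq_iff_iff]
  simp only [List.all_eq_true]
  constructor
  · intro hall a ha; exact (h a ha) ▸ hall a ha
  · intro hall a ha; exact (h a ha).symm ▸ hall a ha

theorem pvAnyNot {α : Type} (l : List α) (p : α → Bool) :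
    l.any (fun a => !(p a)) = !(l.all p) := by
  induction l with
  | nil => rfl
  | cons a l ih => simp [List.any_cons, List.all_cons, ih, Bool.not_and]

-- grid with the columns j with p j = true toggled
def pvApplyC (p : Nat → Bool) (g : List (List Int)) : List (List Int) :=
  g.map (fun row => row.mapIdx (fun j v => if p j then pvTog v else v))

-- grid with the rows i with q i = true toggled
def pvApplyR (q : Nat → Bool) (g : List (List Int)) : List (List Int) :=
  g.mapIdx (fun i row => if q i then row.map pvTog else row)

def colFlags (g : List (List Int)) (n : Nat) (j : Nat) : Bool :=
  (List.range n).any (fun i => pvCellA g i j == 0)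

def rowFlags (g : List (List Int)) (m : Nat) (i : Nat) : Bool :=
  (List.range m).any (fun j => pvCellA g i j == 0)

theorem pvApplyC_congr {p q : Nat → Bool} {m : Nat} (g : List (List Int))
    (hrow : ∀ i (h : i < g.length), g[i].length = m) (h : ∀ j < m, p j = q j) :
    pvApplyC p g = pvApplyC q g := by
  unfold pvApplyC
  apply List.map_congr_left
  intro row hmem
  obtain ⟨i, hi, rfl⟩ := List.mem_iff_getElem.mp hmem
  apply List.ext_getElem (by simp)
  intro j h1 h2
  simp only [List.getElem_mapIdx]
  rw [h j (by have := hrow i hi; simp only [List.length_mapIdx] at h1; omega)]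

theorem pvApplyC_false (g : List (List Int)) : pvApplyC (fun _ => false) g = g := by
  unfold pvApplyC
  apply List.ext_getElem (by simp)
  intro i h1 h2
  simp only [List.getElem_map]
  apply List.ext_getElem (by simp)
  intro j hj1 hj2
  simp

theorem pvApplyR_false (g : List (List Int)) : pvApplyR (fun _ => false) g = g := by
  unfold pvApplyR
  apply List.ext_getElem (by simp)
  intro i h1 h2
  simp

theorem pvApplyR_congr {p q : Nat → Bool} {n : Nat} (g : List (List Int))
    (hlen : g.length = n) (h : ∀ i < n, p i = q i) :
    pvApplyR p g = pvApplyR q g := by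
  unfold pvApplyR
  apply List.ext_getElem (by simp)
  intro i h1 h2
  simp only [List.getElem_mapIdx]
  rw [h i (by simp only [List.length_mapIdx] at h1; omega)]

theorem length_applyC (p : Nat → Bool) (g : List (List Int)) : (pvApplyC p g).length = g.length := by
  simp [pvApplyC]

theorem length_applyR (q : Nat → Bool) (g : List (List Int)) : (pvApplyR q g).length = g.length := by
  simp [pvApplyR]

theorem row_length_applyC (p : Nat → Bool) (g : List (List Int)) {m : Nat}
    (hrow : ∀ i (h : i < g.length), g[i].length = m) :
    ∀ i (h : i < (pvApplyC p g).length), (pvApplyC p g)[i].length = m := by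
  intro i h
  have hi : i < g.length := by simpa [pvApplyC] using h
  simp only [pvApplyC, List.getElem_map, List.length_mapIdx]
  exact hrow i hi

theorem cellA_applyC_of_false {p : Nat → Bool} {j : Nat} (g : List (List Int)) (i : Nat)
    (hp : p j = false) : pvCellA (pvApplyC p g) i j = pvCellA g i j := by
  simp only [pvCellA, pvApplyC, List.getD_eq_getElem?_getD, List.getElem?_map]
  cases hg : g[i]? with
  | none => rfl
  | some row =>
    simp only [Option.map_some, Option.getD_some, List.getElem?_mapIdx]
    cases hr : row[j]? with
    | none => rfl
    | some v => simp [hp]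

theorem cellA_applyR_of_false {q : Nat → Bool} {i : Nat} (g : List (List Int)) (j : Nat)
    (hq : q i = false) : pvCellA (pvApplyR q g) i j = pvCellA g i j := by
  simp only [pvCellA, pvApplyR, List.getD_eq_getElem?_getD, List.getElem?_mapIdx]
  cases hg : g[i]? with
  | none => rfl
  | some row => simp [hq]

theorem cellA_applyC {p : Nat → Bool} (g : List (List Int)) {i j : Nat}
    (hi : i < g.length) (hj : j < g[i].length) :
    pvCellA (pvApplyC p g) i j = if p j then pvTog (pvCellA g i j) else pvCellA g i j := by
  simp only [pvCellA, pvApplyC, List.getD_eq_getElem?_getD, List.getElem?_map,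
    List.getElem?_eq_getElem hi, Option.map_some, Option.getD_some, List.getElem?_mapIdx,
    List.getElem?_eq_getElem hj]

theorem cellA_applyR {q : Nat → Bool} (g : List (List Int)) {i j : Nat}
    (hi : i < g.length) (hj : j < g[i].length) :
    pvCellA (pvApplyR q g) i j = if q i then pvTog (pvCellA g i j) else pvCellA g i j := by
  simp only [pvCellA, pvApplyR, List.getD_eq_getElem?_getD, List.getElem?_mapIdx,
    List.getElem?_eq_getElem hi, Option.map_some, Option.getD_some]
  by_cases hq : q i
  · simp [hq, List.getElem?_map, List.getElem?_eq_getElem hj]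
  · simp [hq]

theorem flipCol_applyC {p : Nat → Bool} {j m : Nat} (g : List (List Int))
    (hrow : ∀ i (h : i < g.length), g[i].length = m) (hj : j < m) (hp : p j = false) :
    pvFlipCol (pvApplyC p g) j = pvApplyC (fun j' => p j' || (j' == j)) g := by
  unfold pvFlipCol pvApplyC
  rw [List.map_map]
  apply List.map_congr_left
  intro row hmem
  obtain ⟨i, hi, rfl⟩ := List.mem_iff_getElem.mp hmem
  apply List.ext_getElem (by simp [List.length_modify])
  intro j' h1 h2
  simp only [Function.comp_apply] at *
  rw [List.getElem_modify]
  simp only [List.getElem_mapIdx]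
  by_cases hjj : j = j'
  · subst hjj
    simp [hp]
  · have hne : (j' == j) = false := by simp [Ne.symm hjj]
    simp [hjj, hne]

theorem flipRow_applyR {q : Nat → Bool} {i : Nat} (g : List (List Int)) (hq : q i = false) :
    pvFlipRow (pvApplyR q g) i = pvApplyR (fun i' => q i' || (i' == i)) g := by
  unfold pvFlipRow pvApplyR
  apply List.ext_getElem (by simp [List.length_modify])
  intro i' h1 h2
  rw [List.getElem_modify]
  simp only [List.getElem_mapIdx]
  by_cases hii : i = i'
  · subst hii
    simp [hq]
  · have hne : (i' == i) = false := by simp [Ne.symm hii]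
    simp [hii, hne]

theorem decide_lt_succ {j k : Nat} (h : j ≠ k) : decide (j < k + 1) = decide (j < k) := by
  by_cases hl : j < k
  · simp [hl, Nat.lt_succ_of_lt hl]
  · have h2 : ¬ (j < k + 1) := by omega
    simp [hl, h2]

theorem colPass_spec {n m : Nat} (g : List (List Int)) (hlen : g.length = n)
    (hrow : ∀ i (h : i < g.length), g[i].length = m) (t : Int) :
    ∀ k, k ≤ m →
    (List.range k).foldl (pvColStep n) (g, t) =
      (pvApplyC (fun j => decide (j < k) && colFlags g n j) g,
       t + (n : Int) * ((List.range k).countP (colFlags g n))) := by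
  intro k
  induction k with
  | zero =>
    intro _
    simp only [List.range_zero, List.foldl_nil, List.countP_nil, Nat.cast_zero, mul_zero, add_zero]
    rw [pvApplyC_congr g hrow (q := fun _ => false) (by intro j hj; simp), pvApplyC_false]
  | succ k ih =>
    intro hk
    have hkm : k < m := hk
    rw [List.range_succ, List.foldl_append, List.foldl_cons, List.foldl_nil, ih (le_of_lt hkm)]
    have hpk : (decide (k < k) && colFlags g n k) = false := by simp
    have hcond : (List.range n).any
        (fun i => pvCellA (pvApplyC (fun j => decide (j < k) && colFlags g n j) g) i k == 0)
        = colFlags g n k := by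
      refine Eq.trans (pvAnyCongrMem ?_) rfl
      intro i _
      rw [cellA_applyC_of_false g i hpk]
    have hcount : ((List.range k ++ [k]).countP (colFlags g n) : Int)
        = ((List.range k).countP (colFlags g n) : Int) + (if colFlags g n k then 1 else 0) := by
      rw [List.countP_append, List.countP_cons, List.countP_nil]
      by_cases hc : colFlags g n k <;> simp [hc]
    simp only [pvColStep, hcond]
    by_cases hc : colFlags g n k
    · rw [if_pos hc, flipCol_applyC g hrow hkm hpk]
      simp only [Prod.mk.injEq]
      refine ⟨?_, ?_⟩
      · apply pvApplyC_congr g hrow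
        intro j hjm
        by_cases hjk : j = k
        · rw [hjk]; simp [hc, Nat.lt_succ_self]
        · rw [show (j == k) = false from by simp [hjk], Bool.or_false, decide_lt_succ hjk]
      · rw [hcount, if_pos hc]; ring
    · rw [if_neg (by simp [hc])]
      simp only [Prod.mk.injEq]
      refine ⟨?_, ?_⟩
      · apply pvApplyC_congr g hrow
        intro j hjm
        by_cases hjk : j = k
        · have hcf : colFlags g n k = false := by simp [hc]
          rw [hjk]
          simp [hcf]
        · rw [decide_lt_succ hjk]
      · rw [hcount, if_neg hc]; ring

theorem rowPass_spec {n m : Nat} (g : List (List Int)) (hlen : g.length = n) (t : Int) :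
    ∀ k, k ≤ n →
    (List.range k).foldl (pvRowStep m) (g, t) =
      (pvApplyR (fun i => decide (i < k) && rowFlags g m i) g,
       t + (m : Int) * ((List.range k).countP (rowFlags g m))) := by
  intro k
  induction k with
  | zero =>
    intro _
    simp only [List.range_zero, List.foldl_nil, List.countP_nil, Nat.cast_zero, mul_zero, add_zero]
    rw [pvApplyR_congr g hlen (q := fun _ => false) (by intro i hi; simp), pvApplyR_false]
  | succ k ih =>
    intro hk
    have hkn : k < n := hk
    rw [List.range_succ, List.foldl_append, List.foldl_cons, List.foldl_nil, ih (le_of_lt hkn)]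
    have hpk : (decide (k < k) && rowFlags g m k) = false := by simp
    have hcond : (List.range m).any
        (fun j => pvCellA (pvApplyR (fun i => decide (i < k) && rowFlags g m i) g) k j == 0)
        = rowFlags g m k := by
      refine Eq.trans (pvAnyCongrMem ?_) rfl
      intro j _
      rw [cellA_applyR_of_false g j hpk]
    have hcount : ((List.range k ++ [k]).countP (rowFlags g m) : Int)
        = ((List.range k).countP (rowFlags g m) : Int) + (if rowFlags g m k then 1 else 0) := by
      rw [List.countP_append, List.countP_cons, List.countP_nil]
      by_cases hc : rowFlags g m k <;> simp [hc]
    simp only [pvRowStep, hcond]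
    by_cases hc : rowFlags g m k
    · rw [if_pos hc, flipRow_applyR g hpk]
      simp only [Prod.mk.injEq]
      refine ⟨?_, ?_⟩
      · apply pvApplyR_congr g hlen
        intro i hin
        by_cases hik : i = k
        · rw [hik]; simp [hc, Nat.lt_succ_self]
        · rw [show (i == k) = false from by simp [hik], Bool.or_false, decide_lt_succ hik]
      · rw [hcount, if_pos hc]; ring
    · rw [if_neg (by simp [hc])]
      simp only [Prod.mk.injEq]
      refine ⟨?_, ?_⟩
      · apply pvApplyR_congr g hlen
        intro i hin
        by_cases hik : i = k
        · have hcf : rowFlags g m k = false := by simp [hc]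
          rw [hik]
          simp [hcf]
        · rw [decide_lt_succ hik]
      · rw [hcount, if_neg hc]; ring

-- The 0/1 matrix A builds, as a function of the cell predicate b
def pvMkA (n m : Nat) (b : Nat → Nat → Bool) : List (List Int) :=
  (List.range n).map (fun i => (List.range m).map (fun j => if b i j then (1 : Int) else 0))

-- flip-flag vectors of A's two greedy strategies
def cz1 (n m : Nat) (b : Nat → Nat → Bool) (j : Nat) : Bool :=
  !((List.range n).all (fun i => b i j))
def rz1 (n m : Nat) (b : Nat → Nat → Bool) (i : Nat) : Bool :=
  !((List.range m).all (fun j => b i j != cz1 n m b j))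
def rz2 (n m : Nat) (b : Nat → Nat → Bool) (i : Nat) : Bool :=
  !((List.range m).all (fun j => b i j))
def cz2 (n m : Nat) (b : Nat → Nat → Bool) (j : Nat) : Bool :=
  !((List.range n).all (fun i => b i j != rz2 n m b i))

-- validity of the two greedy strategies (the `one` / `two` flags in closed form)
def V1b (n m : Nat) (b : Nat → Nat → Bool) : Bool :=
  (List.range n).all (fun i => (List.range m).all (fun j =>
    (b i j != cz1 n m b j) != rz1 n m b i))
def V2b (n m : Nat) (b : Nat → Nat → Bool) : Bool :=
  (List.range n).all (fun i => (List.range m).all (fun j =>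
    (b i j != cz2 n m b j) != rz2 n m b i))

theorem length_mkA (n m : Nat) (b : Nat → Nat → Bool) : (pvMkA n m b).length = n := by
  simp [pvMkA]

theorem row_length_mkA (n m : Nat) (b : Nat → Nat → Bool) :
    ∀ i (h : i < (pvMkA n m b).length), (pvMkA n m b)[i].length = m := by
  intro i h
  simp [pvMkA]

theorem cellA_mkA (n m : Nat) (b : Nat → Nat → Bool) {i j : Nat} (hi : i < n) (hj : j < m) :
    pvCellA (pvMkA n m b) i j = if b i j then 1 else 0 := by
  have h1 : i < (pvMkA n m b).length := by simp [pvMkA, hi]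
  have h2 : j < (pvMkA n m b)[i].length := by simp [pvMkA, hj]
  simp only [pvCellA, List.getD_eq_getElem?_getD, List.getElem?_eq_getElem h1,
    Option.getD_some, List.getElem?_eq_getElem h2]
  simp [pvMkA]

theorem colFlags_mkA (n m : Nat) (b : Nat → Nat → Bool) {j : Nat} (hj : j < m) :
    colFlags (pvMkA n m b) n j = cz1 n m b j := by
  unfold colFlags cz1
  rw [← pvAnyNot]
  apply pvAnyCongrMem
  intro i hi
  rw [cellA_mkA n m b (List.mem_range.mp hi) hj]
  by_cases hb : b i j <;> simp [hb]

theorem row_length_applyR (q : Nat → Bool) (g : List (List Int)) {m : Nat}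
    (hrow : ∀ i (h : i < g.length), g[i].length = m) :
    ∀ i (h : i < (pvApplyR q g).length), (pvApplyR q g)[i].length = m := by
  intro i h
  have hi : i < g.length := by simpa [pvApplyR] using h
  simp only [pvApplyR, List.getElem_mapIdx]
  by_cases hq : q i <;> simp [hq, hrow i hi]

theorem rowFlags_mkA (n m : Nat) (b : Nat → Nat → Bool) {i : Nat} (hi : i < n) :
    rowFlags (pvMkA n m b) m i = rz2 n m b i := by
  unfold rowFlags rz2
  rw [← pvAnyNot]
  apply pvAnyCongrMem
  intro j hj
  rw [cellA_mkA n m b hi (List.mem_range.mp hj)]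
  by_cases hb : b i j <;> simp [hb]

theorem getD_map_range {β : Type} (f : Nat → β) {j m : Nat} (hj : j < m) (d : β) :
    (((List.range m).map f).getD j d) = f j := by
  rw [List.getD_eq_getElem?_getD, List.getElem?_map,
    List.getElem?_eq_getElem (by simpa using hj)]
  simp

-- Strategy 1 (columns then rows): temp counter and all-ones flag in closed form
theorem strat1_spec (n m : Nat) (b : Nat → Nat → Bool) :
    ((List.range n).foldl (pvRowStep m) ((List.range m).foldl (pvColStep n) (pvMkA n m b, 0))).2
      = (n : Int) * ((List.range m).countP (cz1 n m b))
        + (m : Int) * ((List.range n).countP (rz1 n m b))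
    ∧ pvAllOne n m ((List.range n).foldl (pvRowStep m)
        ((List.range m).foldl (pvColStep n) (pvMkA n m b, 0))).1
      = V1b n m b := by
  have hlen : (pvMkA n m b).length = n := length_mkA n m b
  have hrow := row_length_mkA n m b
  rw [colPass_spec (pvMkA n m b) hlen hrow 0 m le_rfl]
  have hlenh : (pvApplyC (fun j => decide (j < m) && colFlags (pvMkA n m b) n j)
      (pvMkA n m b)).length = n := by
    rw [length_applyC]; exact hlen
  rw [rowPass_spec _ hlenh _ n le_rfl]
  have cell_h : ∀ i < n, ∀ j < m,
      pvCellA (pvApplyC (fun j => decide (j < m) && colFlags (pvMkA n m b) n j)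
        (pvMkA n m b)) i j
      = if (b i j != cz1 n m b j) then 1 else 0 := by
    intro i hi j hj
    rw [cellA_applyC (pvMkA n m b) (by rw [hlen]; exact hi)
        (by rw [row_length_mkA n m b i (by rw [hlen]; exact hi)]; exact hj)]
    rw [show (decide (j < m) && colFlags (pvMkA n m b) n j) = cz1 n m b j from by
          simp [hj, colFlags_mkA n m b hj]]
    rw [cellA_mkA n m b hi hj]
    cases hbv : b i j <;> cases hcz : cz1 n m b j <;> simp [pvTog]
  have hrz : ∀ i < n, rowFlags (pvApplyC (fun j => decide (j < m) && colFlags (pvMkA n m b) n j)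
      (pvMkA n m b)) m i = rz1 n m b i := by
    intro i hi
    unfold rowFlags rz1
    rw [← pvAnyNot]
    apply pvAnyCongrMem
    intro j hj
    rw [cell_h i hi j (List.mem_range.mp hj)]
    cases hx : (b i j != cz1 n m b j) <;> simp
  constructor
  · dsimp only
    have hc1 : (List.range m).countP (colFlags (pvMkA n m b) n)
        = (List.range m).countP (cz1 n m b) :=
      List.countP_congr (fun j hj => by rw [colFlags_mkA n m b (List.mem_range.mp hj)])
    have hc2 : (List.range n).countP (rowFlags (pvApplyC
          (fun j => decide (j < m) && colFlags (pvMkA n m b) n j) (pvMkA n m b)) m)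
        = (List.range n).countP (rz1 n m b) :=
      List.countP_congr (fun i hi => by rw [hrz i (List.mem_range.mp hi)])
    rw [hc1, hc2]
    ring
  · dsimp only
    unfold pvAllOne V1b
    apply pvAllCongrMem
    intro i hi
    have hi' := List.mem_range.mp hi
    apply pvAllCongrMem
    intro j hj
    have hj' := List.mem_range.mp hj
    rw [cellA_applyR _ (by rw [hlenh]; exact hi')
        (by rw [row_length_applyC _ (pvMkA n m b) hrow i (by rw [hlenh]; exact hi')]; exact hj')]
    rw [show (decide (i < n) && rowFlags (pvApplyC
          (fun j => decide (j < m) && colFlags (pvMkA n m b) n j) (pvMkA n m b)) m i)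
        = rz1 n m b i from by simp [hi', hrz i hi']]
    rw [cell_h i hi' j hj']
    cases hx : (b i j != cz1 n m b j) <;> cases hy : rz1 n m b i <;> simp [pvTog]

-- Strategy 2 (rows then columns)
theorem strat2_spec (n m : Nat) (b : Nat → Nat → Bool) :
    ((List.range m).foldl (pvColStep n) ((List.range n).foldl (pvRowStep m) (pvMkA n m b, 0))).2
      = (m : Int) * ((List.range n).countP (rz2 n m b))
        + (n : Int) * ((List.range m).countP (cz2 n m b))
    ∧ pvAllOne n m ((List.range m).foldl (pvColStep n)
        ((List.range n).foldl (pvRowStep m) (pvMkA n m b, 0))).1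
      = V2b n m b := by
  have hlen : (pvMkA n m b).length = n := length_mkA n m b
  have hrow := row_length_mkA n m b
  rw [rowPass_spec (pvMkA n m b) hlen 0 n le_rfl]
  have hlenh : (pvApplyR (fun i => decide (i < n) && rowFlags (pvMkA n m b) m i)
      (pvMkA n m b)).length = n := by
    rw [length_applyR]; exact hlen
  have hrowh := row_length_applyR (fun i => decide (i < n) && rowFlags (pvMkA n m b) m i)
      (pvMkA n m b) hrow
  rw [colPass_spec _ hlenh hrowh _ m le_rfl]
  have cell_h : ∀ i < n, ∀ j < m,
      pvCellA (pvApplyR (fun i => decide (i < n) && rowFlags (pvMkA n m b) m i)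
        (pvMkA n m b)) i j
      = if (b i j != rz2 n m b i) then 1 else 0 := by
    intro i hi j hj
    rw [cellA_applyR (pvMkA n m b) (by rw [hlen]; exact hi)
        (by rw [row_length_mkA n m b i (by rw [hlen]; exact hi)]; exact hj)]
    rw [show (decide (i < n) && rowFlags (pvMkA n m b) m i) = rz2 n m b i from by
          simp [hi, rowFlags_mkA n m b hi]]
    rw [cellA_mkA n m b hi hj]
    cases hbv : b i j <;> cases hcz : rz2 n m b i <;> simp [pvTog]
  have hcz : ∀ j < m, colFlags (pvApplyR (fun i => decide (i < n) && rowFlags (pvMkA n m b) m i)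
      (pvMkA n m b)) n j = cz2 n m b j := by
    intro j hj
    unfold colFlags cz2
    rw [← pvAnyNot]
    apply pvAnyCongrMem
    intro i hi
    rw [cell_h i (List.mem_range.mp hi) j hj]
    cases hx : (b i j != rz2 n m b i) <;> simp
  constructor
  · dsimp only
    have hc1 : (List.range n).countP (rowFlags (pvMkA n m b) m)
        = (List.range n).countP (rz2 n m b) :=
      List.countP_congr (fun i hi => by rw [rowFlags_mkA n m b (List.mem_range.mp hi)])
    have hc2 : (List.range m).countP (colFlags (pvApplyR
          (fun i => decide (i < n) && rowFlags (pvMkA n m b) m i) (pvMkA n m b)) n)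
        = (List.range m).countP (cz2 n m b) :=
      List.countP_congr (fun j hj => by rw [hcz j (List.mem_range.mp hj)])
    rw [hc1, hc2]
    ring
  · dsimp only
    unfold pvAllOne V2b
    apply pvAllCongrMem
    intro i hi
    have hi' := List.mem_range.mp hi
    apply pvAllCongrMem
    intro j hj
    have hj' := List.mem_range.mp hj
    rw [cellA_applyC _ (by rw [hlenh]; exact hi')
        (by rw [hrowh i (by rw [hlenh]; exact hi')]; exact hj')]
    rw [show (decide (j < m) && colFlags (pvApplyR
          (fun i => decide (i < n) && rowFlags (pvMkA n m b) m i) (pvMkA n m b)) n j)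
        = cz2 n m b j from by simp [hj', hcz j hj']]
    rw [cell_h i hi' j hj']
    cases hx : b i j <;> cases hy : rz2 n m b i <;> cases hz : cz2 n m b j <;> simp [pvTog]

-- ===== B-side lemmas =====

theorem pvAllConst (n : Nat) (hn : 0 < n) (c : Bool) : (List.range n).all (fun _ => c) = c := by
  cases c
  · obtain ⟨k, rfl⟩ : ∃ k, n = k + 1 := ⟨n - 1, by omega⟩
    simp [List.range_succ_eq_map]
  · simp

theorem pvMapRangeEq {β : Type} (m : Nat) (f g : Nat → β) :
    ((List.range m).map f = (List.range m).map g) ↔ ∀ j < m, f j = g j := by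
  constructor
  · intro h j hj
    have h1 : ((List.range m).map f)[j]'(by simpa using hj)
        = ((List.range m).map g)[j]'(by simpa using hj) := List.getElem_of_eq h _
    simpa using h1
  · intro h
    apply List.map_congr_left
    intro j hj
    exact h j (List.mem_range.mp hj)

theorem pvZipAll (m : Nat) (f g : Nat → Bool) :
    ((((List.range m).map f).zip ((List.range m).map g)).all (fun p => p.1 != p.2))
      = (List.range m).all (fun j => f j != g j) := by
  rw [List.zip_map', List.all_map]
  rfl

theorem pvEqMapGetD (R : List Bool) :
    R = (List.range R.length).map (fun k => R.getD k false) := by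
  apply List.ext_getElem (by simp)
  intro i h1 h2
  simp [List.getD_eq_getElem?_getD, List.getElem?_eq_getElem h1]

theorem pvClassify_some (a : List Bool) :
    ∀ (rows : List (List Bool)) (R : List Bool), pvClassify rows a = some R →
      R.length = rows.length ∧
      ∀ k, k < rows.length →
        (R.getD k false = false ∧ rows.getD k [] = a) ∨
        (R.getD k false = true ∧ ((rows.getD k []).zip a).all (fun p => p.1 != p.2) = true) := by
  intro rows
  induction rows with
  | nil =>
    intro R h
    simp only [pvClassify, Option.some.injEq] at h
    subst h
    exact ⟨rfl, fun k hk => absurd hk (by simp)⟩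
  | cons row rest ih =>
    intro R h
    simp only [pvClassify] at h
    split_ifs at h with h1 h2
    · cases hres : pvClassify rest a with
      | none => rw [hres] at h; simp at h
      | some R' =>
        rw [hres] at h
        simp only [Option.map_some, Option.some.injEq] at h
        subst h
        obtain ⟨hl, hk⟩ := ih R' hres
        refine ⟨by simp [hl], ?_⟩
        intro k hk'
        cases k with
        | zero => exact Or.inl ⟨rfl, by simpa using eq_of_beq h1⟩
        | succ k => simpa using hk k (by simpa using hk')
    · cases hres : pvClassify rest a with
      | none => rw [hres] at h; simp at h
      | some R' =>
        rw [hres] at h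
        simp only [Option.map_some, Option.some.injEq] at h
        subst h
        obtain ⟨hl, hk⟩ := ih R' hres
        refine ⟨by simp [hl], ?_⟩
        intro k hk'
        cases k with
        | zero => exact Or.inr ⟨rfl, by simpa using h2⟩
        | succ k => simpa using hk k (by simpa using hk')

theorem pvClassify_none (a : List Bool) :
    ∀ rows, pvClassify rows a = none →
      ∃ k, k < rows.length ∧ rows.getD k [] ≠ a ∧
        ((rows.getD k []).zip a).all (fun p => p.1 != p.2) = false := by
  intro rows
  induction rows with
  | nil => intro h; simp [pvClassify] at h
  | cons row rest ih =>
    intro h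
    simp only [pvClassify] at h
    split_ifs at h with h1 h2
    · cases hres : pvClassify rest a with
      | none =>
        obtain ⟨k, hk, hne, hcomp⟩ := ih hres
        exact ⟨k + 1, by simpa using hk, by simpa using hne, by simpa using hcomp⟩
      | some R' => rw [hres] at h; simp at h
    · cases hres : pvClassify rest a with
      | none =>
        obtain ⟨k, hk, hne, hcomp⟩ := ih hres
        exact ⟨k + 1, by simpa using hk, by simpa using hne, by simpa using hcomp⟩
      | some R' => rw [hres] at h; simp at h
    · refine ⟨0, by simp, ?_, ?_⟩
      · simpa using fun hEq => h1 (by simp [hEq])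
      · simpa using Bool.eq_false_iff.mpr h2

-- from a valid (columns, rows) flag pair, every row equals or complements row 0
theorem pvAligned {n m : Nat} (b : Nat → Nat → Bool) (c r : Nat → Bool)
    (H : ∀ i < n, ∀ j < m, ((b i j != c j) != r i) = true) (hn : 0 < n)
    (k : Nat) (hk : k < n) :
    (∀ j < m, b k j = b 0 j) ∨ (∀ j < m, b k j = !(b 0 j)) := by
  by_cases hr : r k = r 0
  · left
    intro j hj
    have h1 := H k hk j hj
    have h2 := H 0 hn j hj
    rw [hr] at h1
    revert h1 h2
    cases b k j <;> cases b 0 j <;> cases c j <;> cases r 0 <;> simp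
  · have hr' : r k = !(r 0) := by revert hr; cases r k <;> cases r 0 <;> simp
    right
    intro j hj
    have h1 := H k hk j hj
    have h2 := H 0 hn j hj
    rw [hr'] at h1
    revert h1 h2
    cases b k j <;> cases b 0 j <;> cases c j <;> cases r 0 <;> simp


-- ===== per-case evaluation of the greedy strategies under the row-structure hypothesis =====

theorem pvS1_allEq (n m : Nat) (b : Nat → Nat → Bool) (ρ : Nat → Bool)
    (hn : 0 < n) (Hb : ∀ i < n, ∀ j < m, b i j = (b 0 j != ρ i))
    (hρ : ∀ i < n, ρ i = false) :
    V1b n m b = true ∧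
    (List.range m).countP (cz1 n m b) = (List.range m).countP (fun j => !(b 0 j)) ∧
    (List.range n).countP (rz1 n m b) = 0 := by
  have hb : ∀ i < n, ∀ j < m, b i j = b 0 j := by
    intro i hi j hj
    rw [Hb i hi j hj, hρ i hi]
    cases b 0 j <;> rfl
  have hcz : ∀ j < m, cz1 n m b j = !(b 0 j) := by
    intro j hj
    unfold cz1
    rw [pvAllCongrMem (q := fun _ => b 0 j)
        (fun i hi => hb i (List.mem_range.mp hi) j hj), pvAllConst n hn]
  have hrz : ∀ i < n, rz1 n m b i = false := by
    intro i hi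
    unfold rz1
    rw [pvAllCongrMem (q := fun _ => true) (fun j hj => by
      rw [hb i hi j (List.mem_range.mp hj), hcz j (List.mem_range.mp hj)]
      cases b 0 j <;> rfl)]
    simp
  refine ⟨?_, by apply List.countP_congr; intro j hj; rw [hcz j (List.mem_range.mp hj)], ?_⟩
  · unfold V1b
    rw [pvAllCongrMem (q := fun _ => true) (fun i hi => by
      rw [pvAllCongrMem (q := fun _ => true) (fun j hj => by
        rw [hb i (List.mem_range.mp hi) j (List.mem_range.mp hj),
            hcz j (List.mem_range.mp hj), hrz i (List.mem_range.mp hi)]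
        cases b 0 j <;> rfl)]
      simp)]
    simp
  · exact List.countP_eq_zero.mpr (fun i hi => by simp [hrz i (List.mem_range.mp hi)])

theorem pvS1_const (n m : Nat) (b : Nat → Nat → Bool) (ρ : Nat → Bool)
    (hn : 0 < n) (hm : 0 < m) (Hb : ∀ i < n, ∀ j < m, b i j = (b 0 j != ρ i))
    (hρ0 : ρ 0 = false) (hmix : ∃ i, i < n ∧ ρ i = true)
    (hv : ∀ j < m, b 0 j = b 0 0) :
    V1b n m b = true ∧
    (List.range m).countP (cz1 n m b) = m ∧
    (List.range n).countP (rz1 n m b) = (List.range n).countP (fun i => ρ i != b 0 0) := by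
  obtain ⟨iw, hiw, hiwT⟩ := hmix
  have hb : ∀ i < n, ∀ j < m, b i j = (b 0 0 != ρ i) := by
    intro i hi j hj
    rw [Hb i hi j hj, hv j hj]
  have hcz : ∀ j < m, cz1 n m b j = true := by
    intro j hj
    unfold cz1
    have hall : (List.range n).all (fun i => b i j) = false := by
      apply Bool.eq_false_iff.mpr
      intro hall
      rw [List.all_eq_true] at hall
      cases hvv : b 0 0 with
      | false =>
        have h := hall 0 (List.mem_range.mpr hn)
        rw [hb 0 hn j hj, hvv, hρ0] at h
        simp at h
      | true =>
        have h := hall iw (List.mem_range.mpr hiw)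
        rw [hb iw hiw j hj, hvv, hiwT] at h
        simp at h
    simp [hall]
  have hrz : ∀ i < n, rz1 n m b i = (b 0 0 != ρ i) := by
    intro i hi
    unfold rz1
    rw [pvAllCongrMem (q := fun _ => !(b 0 0 != ρ i)) (fun j hj => by
      rw [hb i hi j (List.mem_range.mp hj), hcz j (List.mem_range.mp hj)]
      cases b 0 0 <;> cases ρ i <;> rfl)]
    rw [pvAllConst m hm]
    simp
  refine ⟨?_, ?_, ?_⟩
  · unfold V1b
    rw [pvAllCongrMem (q := fun _ => true) (fun i hi => by
      rw [pvAllCongrMem (q := fun _ => true) (fun j hj => by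
        rw [hb i (List.mem_range.mp hi) j (List.mem_range.mp hj),
            hcz j (List.mem_range.mp hj), hrz i (List.mem_range.mp hi)]
        cases b 0 0 <;> cases ρ i <;> rfl)]
      simp)]
    simp
  · have heq : (List.range m).countP (cz1 n m b) = (List.range m).countP (fun _ => true) :=
      List.countP_congr (fun j hj => by rw [hcz j (List.mem_range.mp hj)])
    rw [heq]
    simp
  · apply List.countP_congr
    intro i hi
    rw [hrz i (List.mem_range.mp hi)]
    cases b 0 0 <;> cases ρ i <;> rfl

theorem pvS1_mixed (n m : Nat) (b : Nat → Nat → Bool) (ρ : Nat → Bool)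
    (hn : 0 < n) (hm : 0 < m) (Hb : ∀ i < n, ∀ j < m, b i j = (b 0 j != ρ i))
    (hρ0 : ρ 0 = false) (hmix : ∃ i, i < n ∧ ρ i = true)
    (hT : ∃ j, j < m ∧ b 0 j = true) (hF : ∃ j, j < m ∧ b 0 j = false) :
    V1b n m b = false := by
  obtain ⟨iw, hiw, hiwT⟩ := hmix
  obtain ⟨jT, hjT, hjTv⟩ := hT
  obtain ⟨jF, hjF, hjFv⟩ := hF
  have hcz : ∀ j < m, cz1 n m b j = true := by
    intro j hj
    unfold cz1
    have hall : (List.range n).all (fun i => b i j) = false := by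
      apply Bool.eq_false_iff.mpr
      intro hall
      rw [List.all_eq_true] at hall
      cases hbj : b 0 j with
      | true =>
        have h := hall iw (List.mem_range.mpr hiw)
        rw [Hb iw hiw j hj, hbj, hiwT] at h
        simp at h
      | false =>
        have h := hall 0 (List.mem_range.mpr hn)
        rw [Hb 0 hn j hj, hbj, hρ0] at h
        simp at h
    simp [hall]
  have hrz : ∀ i < n, rz1 n m b i = true := by
    intro i hi
    unfold rz1
    have hall : (List.range m).all (fun j => b i j != cz1 n m b j) = false := by
      apply Bool.eq_false_iff.mpr
      intro hall
      rw [List.all_eq_true] at hall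
      cases hri : ρ i with
      | false =>
        have h := hall jT (List.mem_range.mpr hjT)
        rw [Hb i hi jT hjT, hjTv, hri, hcz jT hjT] at h
        simp at h
      | true =>
        have h := hall jF (List.mem_range.mpr hjF)
        rw [Hb i hi jF hjF, hjFv, hri, hcz jF hjF] at h
        simp at h
    simp [hall]
  apply Bool.eq_false_iff.mpr
  intro hall
  unfold V1b at hall
  rw [List.all_eq_true] at hall
  have h := hall 0 (List.mem_range.mpr hn)
  rw [List.all_eq_true] at h
  have h2 := h jF (List.mem_range.mpr hjF)
  rw [Hb 0 hn jF hjF, hjFv, hρ0, hcz jF hjF, hrz 0 hn] at h2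
  simp at h2

theorem pvS2_const (n m : Nat) (b : Nat → Nat → Bool) (ρ : Nat → Bool)
    (hn : 0 < n) (hm : 0 < m) (Hb : ∀ i < n, ∀ j < m, b i j = (b 0 j != ρ i))
    (hv : ∀ j < m, b 0 j = b 0 0) :
    V2b n m b = true ∧
    (List.range m).countP (cz2 n m b) = 0 ∧
    (List.range n).countP (rz2 n m b) = (List.range n).countP (fun i => ρ i == b 0 0) := by
  have hb : ∀ i < n, ∀ j < m, b i j = (b 0 0 != ρ i) := by
    intro i hi j hj
    rw [Hb i hi j hj, hv j hj]
  have hrz : ∀ i < n, rz2 n m b i = !(b 0 0 != ρ i) := by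
    intro i hi
    unfold rz2
    rw [pvAllCongrMem (q := fun _ => (b 0 0 != ρ i))
        (fun j hj => hb i hi j (List.mem_range.mp hj)), pvAllConst m hm]
  have hcz : ∀ j < m, cz2 n m b j = false := by
    intro j hj
    unfold cz2
    rw [pvAllCongrMem (q := fun _ => true) (fun i hi => by
      rw [hb i (List.mem_range.mp hi) j hj, hrz i (List.mem_range.mp hi)]
      cases b 0 0 <;> cases ρ i <;> rfl)]
    simp
  refine ⟨?_, ?_, ?_⟩
  · unfold V2b
    rw [pvAllCongrMem (q := fun _ => true) (fun i hi => by
      rw [pvAllCongrMem (q := fun _ => true) (fun j hj => by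
        rw [hb i (List.mem_range.mp hi) j (List.mem_range.mp hj),
            hcz j (List.mem_range.mp hj), hrz i (List.mem_range.mp hi)]
        cases b 0 0 <;> cases ρ i <;> rfl)]
      simp)]
    simp
  · exact List.countP_eq_zero.mpr (fun j hj => by simp [hcz j (List.mem_range.mp hj)])
  · apply List.countP_congr
    intro i hi
    rw [hrz i (List.mem_range.mp hi)]
    cases b 0 0 <;> cases ρ i <;> rfl

theorem pvS2_mixedA_allEq (n m : Nat) (b : Nat → Nat → Bool) (ρ : Nat → Bool)
    (hn : 0 < n) (hm : 0 < m) (Hb : ∀ i < n, ∀ j < m, b i j = (b 0 j != ρ i))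
    (hρ : ∀ i < n, ρ i = false)
    (hT : ∃ j, j < m ∧ b 0 j = true) (hF : ∃ j, j < m ∧ b 0 j = false) :
    V2b n m b = true ∧
    (List.range m).countP (cz2 n m b) = (List.range m).countP (fun j => b 0 j) ∧
    (List.range n).countP (rz2 n m b) = n := by
  obtain ⟨jF, hjF, hjFv⟩ := hF
  have hb : ∀ i < n, ∀ j < m, b i j = b 0 j := by
    intro i hi j hj
    rw [Hb i hi j hj, hρ i hi]
    cases b 0 j <;> rfl
  have hrz : ∀ i < n, rz2 n m b i = true := by
    intro i hi
    unfold rz2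
    have hall : (List.range m).all (fun j => b i j) = false := by
      apply Bool.eq_false_iff.mpr
      intro hall
      rw [List.all_eq_true] at hall
      have h := hall jF (List.mem_range.mpr hjF)
      rw [hb i hi jF hjF, hjFv] at h
      simp at h
    simp [hall]
  have hcz : ∀ j < m, cz2 n m b j = b 0 j := by
    intro j hj
    unfold cz2
    rw [pvAllCongrMem (q := fun _ => !(b 0 j)) (fun i hi => by
      rw [hb i (List.mem_range.mp hi) j hj, hrz i (List.mem_range.mp hi)]
      cases b 0 j <;> rfl)]
    rw [pvAllConst n hn]
    simp
  refine ⟨?_, by apply List.countP_congr; intro j hj; rw [hcz j (List.mem_range.mp hj)], ?_⟩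
  · unfold V2b
    rw [pvAllCongrMem (q := fun _ => true) (fun i hi => by
      rw [pvAllCongrMem (q := fun _ => true) (fun j hj => by
        rw [hb i (List.mem_range.mp hi) j (List.mem_range.mp hj),
            hcz j (List.mem_range.mp hj), hrz i (List.mem_range.mp hi)]
        cases b 0 j <;> rfl)]
      simp)]
    simp
  · have heq : (List.range n).countP (rz2 n m b) = (List.range n).countP (fun _ => true) :=
      List.countP_congr (fun i hi => by rw [hrz i (List.mem_range.mp hi)])
    rw [heq]
    simp

theorem pvS2_mixed (n m : Nat) (b : Nat → Nat → Bool) (ρ : Nat → Bool)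
    (hn : 0 < n) (hm : 0 < m) (Hb : ∀ i < n, ∀ j < m, b i j = (b 0 j != ρ i))
    (hρ0 : ρ 0 = false) (hmix : ∃ i, i < n ∧ ρ i = true)
    (hT : ∃ j, j < m ∧ b 0 j = true) (hF : ∃ j, j < m ∧ b 0 j = false) :
    V2b n m b = false := by
  obtain ⟨iw, hiw, hiwT⟩ := hmix
  obtain ⟨jT, hjT, hjTv⟩ := hT
  obtain ⟨jF, hjF, hjFv⟩ := hF
  have hrz : ∀ i < n, rz2 n m b i = true := by
    intro i hi
    unfold rz2
    have hall : (List.range m).all (fun j => b i j) = false := by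
      apply Bool.eq_false_iff.mpr
      intro hall
      rw [List.all_eq_true] at hall
      cases hri : ρ i with
      | false =>
        have h := hall jF (List.mem_range.mpr hjF)
        rw [Hb i hi jF hjF, hjFv, hri] at h
        simp at h
      | true =>
        have h := hall jT (List.mem_range.mpr hjT)
        rw [Hb i hi jT hjT, hjTv, hri] at h
        simp at h
    simp [hall]
  have hcz : ∀ j < m, cz2 n m b j = true := by
    intro j hj
    unfold cz2
    have hall : (List.range n).all (fun i => b i j != rz2 n m b i) = false := by
      apply Bool.eq_false_iff.mpr
      intro hall
      rw [List.all_eq_true] at hall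
      cases hbj : b 0 j with
      | true =>
        have h := hall 0 (List.mem_range.mpr hn)
        rw [Hb 0 hn j hj, hbj, hρ0, hrz 0 hn] at h
        simp at h
      | false =>
        have h := hall iw (List.mem_range.mpr hiw)
        rw [Hb iw hiw j hj, hbj, hiwT, hrz iw hiw] at h
        simp at h
    simp [hall]
  apply Bool.eq_false_iff.mpr
  intro hall
  unfold V2b at hall
  rw [List.all_eq_true] at hall
  have h := hall 0 (List.mem_range.mpr hn)
  rw [List.all_eq_true] at h
  have h2 := h jF (List.mem_range.mpr hjF)
  rw [Hb 0 hn jF hjF, hjFv, hρ0, hcz jF hjF, hrz 0 hn] at h2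
  simp at h2

theorem pvContT (m : Nat) (f : Nat → Bool) :
    ((List.range m).map f).contains true = (List.range m).any f := by
  rw [Bool.eq_iff_iff]
  simp [List.any_eq_true, List.mem_range]
theorem pvContF (m : Nat) (f : Nat → Bool) :
    ((List.range m).map f).contains false = (List.range m).any (fun j => !(f j)) := by
  rw [Bool.eq_iff_iff]
  simp [List.any_eq_true, List.mem_range]
theorem pvCntF (m : Nat) (f : Nat → Bool) :
    ((List.range m).map f).count false = (List.range m).countP (fun j => !(f j)) := by
  rw [List.count_eq_countP, List.countP_map]
  apply List.countP_congr
  intro x _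
  simp [Function.comp]
theorem pvCntT (m : Nat) (f : Nat → Bool) :
    ((List.range m).map f).count true = (List.range m).countP (fun j => f j) := by
  rw [List.count_eq_countP, List.countP_map]
  apply List.countP_congr
  intro x _
  simp

-- A's whole body (graph already in pvMkA form) equals B's whole body, for any cell predicate b
theorem pvCore (n m : Nat) (b : Nat → Nat → Bool) (hn : 0 < n)
    (hBIG : 2 * n * m ≤ 10000000000000000000) :
    (if (!pvAllOne n m ((List.range n).foldl (pvRowStep m)
            ((List.range m).foldl (pvColStep n) (pvMkA n m b, 0))).1
        && !pvAllOne n m ((List.range m).foldl (pvColStep n)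
            ((List.range n).foldl (pvRowStep m) (pvMkA n m b, 0))).1)
     then -1
     else
       (if pvAllOne n m ((List.range m).foldl (pvColStep n)
            ((List.range n).foldl (pvRowStep m) (pvMkA n m b, 0))).1 then
          min (if pvAllOne n m ((List.range n).foldl (pvRowStep m)
                  ((List.range m).foldl (pvColStep n) (pvMkA n m b, 0))).1
               then min (10000000000000000000 : Int)
                    ((List.range n).foldl (pvRowStep m)
                      ((List.range m).foldl (pvColStep n) (pvMkA n m b, 0))).2
               else (10000000000000000000 : Int))
              ((List.range m).foldl (pvColStep n)
                ((List.range n).foldl (pvRowStep m) (pvMkA n m b, 0))).2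
        else (if pvAllOne n m ((List.range n).foldl (pvRowStep m)
                  ((List.range m).foldl (pvColStep n) (pvMkA n m b, 0))).1
              then min (10000000000000000000 : Int)
                   ((List.range n).foldl (pvRowStep m)
                     ((List.range m).foldl (pvColStep n) (pvMkA n m b, 0))).2
              else (10000000000000000000 : Int))))
    =
    (if m = 0 then 0
     else
       match pvClassify ((List.range n).map (fun i => (List.range m).map (fun j => b i j)))
           ((List.range m).map (fun j => b 0 j)) with
       | none => -1
       | some R =>
         let a := (List.range m).map (fun j => b 0 j)
         let mixedR := R.any id
         let mixedA := a.contains true && a.contains false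
         let costs : List Int :=
           (if !mixedR then [((a.count false * n : Nat) : Int)]
            else if !mixedA then
              [((n * m + (R.countP (fun x => x != a.getD 0 false)) * m : Nat) : Int)]
            else [])
           ++ (if !mixedA then [(((R.countP (fun x => x == a.getD 0 false)) * m : Nat) : Int)]
               else if !mixedR then [((n * m + a.count true * n : Nat) : Int)]
               else [])
         (PySem.List.min? costs (fun x => x)).getD (-1)) := by
  obtain ⟨hT1, hO1⟩ := strat1_spec n m b
  obtain ⟨hT2, hO2⟩ := strat2_spec n m b
  rw [hT1, hO1, hT2, hO2]
  by_cases hm0 : m = 0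
  · subst hm0
    rw [if_pos rfl]
    have hV1 : V1b n 0 b = true := by unfold V1b; simp
    have hV2 : V2b n 0 b = true := by unfold V2b; simp
    have hr1 : (List.range n).countP (rz1 n 0 b) = 0 :=
      List.countP_eq_zero.mpr (fun i _ => by simp [rz1])
    have hr2 : (List.range n).countP (rz2 n 0 b) = 0 :=
      List.countP_eq_zero.mpr (fun i _ => by simp [rz2])
    rw [hV1, hV2, hr1, hr2]
    norm_num
  · have hm : 0 < m := Nat.pos_of_ne_zero hm0
    rw [if_neg hm0]
    rcases hC : pvClassify ((List.range n).map (fun i => (List.range m).map (fun j => b i j)))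
        ((List.range m).map (fun j => b 0 j)) with _ | R
    · obtain ⟨k, hk, hkne, hkcomp⟩ := pvClassify_none _ _ hC
      simp only [List.length_map, List.length_range] at hk
      rw [getD_map_range _ hk []] at hkne hkcomp
      rw [pvZipAll] at hkcomp
      have hkc : ∃ j, j < m ∧ (b k j != b 0 j) = false := by
        rcases List.all_eq_false.mp hkcomp with ⟨j, hj, hpj⟩
        exact ⟨j, List.mem_range.mp hj, by simpa using hpj⟩
      have hkne' : ¬ ∀ j < m, b k j = b 0 j := fun h => hkne ((pvMapRangeEq m _ _).mpr h)
      have key : ∀ (c r : Nat → Bool),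
          ((List.range n).all (fun i => (List.range m).all (fun j =>
            (b i j != c j) != r i))) = false := by
        intro c r
        apply Bool.eq_false_iff.mpr
        intro hV
        rw [List.all_eq_true] at hV
        have H : ∀ i < n, ∀ j < m, ((b i j != c j) != r i) = true := by
          intro i hi j hj
          have h3 := hV i (List.mem_range.mpr hi)
          rw [List.all_eq_true] at h3
          exact h3 j (List.mem_range.mpr hj)
        rcases pvAligned b c r H hn k hk with hEq | hComp
        · exact hkne' hEq
        · obtain ⟨j, hj, hjeq⟩ := hkc
          rw [hComp j hj] at hjeq
          cases hb0 : b 0 j <;> rw [hb0] at hjeq <;> simp at hjeq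
      have hV1 : V1b n m b = false := by unfold V1b; exact key _ _
      have hV2 : V2b n m b = false := by unfold V2b; exact key _ _
      rw [hV1, hV2]
      simp
    · obtain ⟨hRlen, hRspec⟩ := pvClassify_some _ _ _ hC
      simp only [List.length_map, List.length_range] at hRlen hRspec
      have hgetrow : ∀ k, k < n →
          (((List.range n).map (fun i => (List.range m).map (fun j => b i j))).getD k [])
            = (List.range m).map (fun j => b k j) := fun k hk => getD_map_range _ hk []
      have Hb : ∀ i < n, ∀ j < m, b i j = (b 0 j != R.getD i false) := by
        intro i hi j hj
        rcases hRspec i hi with ⟨hf, heq⟩ | ⟨hf, hcomp⟩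
        · rw [hgetrow i hi] at heq
          have h2 := (pvMapRangeEq m _ _).mp heq j hj
          rw [h2, hf]
          cases b 0 j <;> rfl
        · rw [hgetrow i hi, pvZipAll] at hcomp
          rw [List.all_eq_true] at hcomp
          have h2 := hcomp j (List.mem_range.mpr hj)
          rw [hf]
          revert h2
          cases b i j <;> cases b 0 j <;> simp
      have hρ0 : R.getD 0 false = false := by
        rcases hRspec 0 hn with ⟨hf, _⟩ | ⟨hf, hcomp⟩
        · exact hf
        · exfalso
          rw [hgetrow 0 hn, pvZipAll, List.all_eq_true] at hcomp
          have h2 := hcomp 0 (List.mem_range.mpr hm)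
          simp at h2
      have hRmap : R = (List.range n).map (fun k => R.getD k false) := by
        have h := pvEqMapGetD R
        rw [hRlen] at h
        exact h
      have hAny : R.any id = (List.range n).any (fun k => R.getD k false) := by
        conv_lhs => rw [hRmap]
        rw [List.any_map]
        rfl
      have hcountR : ∀ p : Bool → Bool,
          R.countP p = (List.range n).countP (fun i => p (R.getD i false)) := by
        intro p
        conv_lhs => rw [hRmap]
        rw [List.countP_map]
        rfl
      have ha0 : ((List.range m).map (fun j => b 0 j)).getD 0 false = b 0 0 :=
        getD_map_range _ hm false
      simp only [hAny, pvContT, pvContF, pvCntF, pvCntT, ha0, hcountR]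
      by_cases hMR : (List.range n).any (fun k => R.getD k false) = true
      · obtain ⟨iw, hiwm, hiwT⟩ := List.any_eq_true.mp hMR
        have hmix : ∃ i, i < n ∧ R.getD i false = true := ⟨iw, List.mem_range.mp hiwm, hiwT⟩
        by_cases hMA : (((List.range m).any (fun j => b 0 j))
            && ((List.range m).any (fun j => !(b 0 j)))) = true
        · -- mixed rows, mixed first row: both strategies invalid, -1 = -1
          obtain ⟨hAT, hAF⟩ : ((List.range m).any (fun j => b 0 j)) = true ∧
              ((List.range m).any (fun j => !(b 0 j))) = true := by simpa using hMA
          obtain ⟨jT, hjTm, hjTv⟩ := List.any_eq_true.mp hAT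
          obtain ⟨jF, hjFm, hjFv⟩ := List.any_eq_true.mp hAF
          have hT : ∃ j, j < m ∧ b 0 j = true := ⟨jT, List.mem_range.mp hjTm, hjTv⟩
          have hF : ∃ j, j < m ∧ b 0 j = false :=
            ⟨jF, List.mem_range.mp hjFm, by simpa using hjFv⟩
          have hV1 := pvS1_mixed n m b (fun k => R.getD k false) hn hm Hb hρ0 hmix hT hF
          have hV2 := pvS2_mixed n m b (fun k => R.getD k false) hn hm Hb hρ0 hmix hT hF
          rw [hV1, hV2, hMR, hMA]
          have hnt : ¬((!(true : Bool)) = true) := by simp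
          rw [if_pos (show ((!(false : Bool) && !(false : Bool)) = true) by simp),
              if_neg hnt, if_neg hnt, if_neg hnt, if_neg hnt]
          rfl
        · -- mixed rows, constant first row
          have hMAf : (((List.range m).any (fun j => b 0 j))
              && ((List.range m).any (fun j => !(b 0 j)))) = false := Bool.eq_false_iff.mpr hMA
          have hv : ∀ j < m, b 0 j = b 0 0 := by
            have hnand : ((List.range m).any (fun j => b 0 j)) = false ∨
                ((List.range m).any (fun j => !(b 0 j))) = false := by
              cases hX : ((List.range m).any (fun j => b 0 j)) with
              | false => exact Or.inl rfl
              | true =>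
                cases hY : ((List.range m).any (fun j => !(b 0 j))) with
                | false => exact Or.inr rfl
                | true => exact absurd (by simp [hX, hY]) hMA
            intro j hj
            rcases hnand with h | h
            · have hall : ∀ j' , j' < m → b 0 j' = false := by
                intro j' hj'
                cases hb' : b 0 j'
                · rfl
                · have h4 : (List.range m).any (fun j => b 0 j) = true :=
                    List.any_eq_true.mpr ⟨j', List.mem_range.mpr hj', hb'⟩
                  rw [h] at h4
                  exact absurd h4 (by simp)
              rw [hall j hj, hall 0 hm]
            · have hall : ∀ j' , j' < m → b 0 j' = true := by
                intro j' hj'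
                cases hb' : b 0 j'
                · have h4 : (List.range m).any (fun j => !(b 0 j)) = true :=
                    List.any_eq_true.mpr ⟨j', List.mem_range.mpr hj', by simp [hb']⟩
                  rw [h] at h4
                  exact absurd h4 (by simp)
                · rfl
              rw [hall j hj, hall 0 hm]
          obtain ⟨hV1, hc1, hr1⟩ := pvS1_const n m b (fun k => R.getD k false) hn hm Hb hρ0 hmix hv
          obtain ⟨hV2, hc2, hr2⟩ := pvS2_const n m b (fun k => R.getD k false) hn hm Hb hv
          rw [hV1, hV2, hc1, hr1, hc2, hr2, hMR, hMAf]
          rw [if_neg (show ¬((!(true : Bool) && !(true : Bool)) = true) by simp),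
              if_pos (rfl : (true : Bool) = true), if_pos (rfl : (true : Bool) = true),
              if_neg (show ¬((!(true : Bool)) = true) by simp),
              if_pos (show ((!(false : Bool)) = true) by simp),
              if_pos (show ((!(false : Bool)) = true) by simp)]
          simp only [List.cons_append, List.nil_append]
          rw [PySem.List.min?_id_cons]
          simp only [List.foldl_cons, List.foldl_nil, Option.getD_some]
          have hr1le : (List.range n).countP (fun i => R.getD i false != b 0 0) ≤ n := by
            have h := List.countP_le_length
              (p := fun i => R.getD i false != b 0 0) (l := List.range n)
            simpa using h
          have hr2le : (List.range n).countP (fun i => R.getD i false == b 0 0) ≤ n := by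
            have h := List.countP_le_length
              (p := fun i => R.getD i false == b 0 0) (l := List.range n)
            simpa using h
          have hC1le : (n : Int) * (m : Int)
              + (m : Int) * ((List.range n).countP (fun i => R.getD i false != b 0 0)) ≤
              10000000000000000000 := by
            have h : n * m + m * ((List.range n).countP (fun i => R.getD i false != b 0 0))
                ≤ 2 * n * m := by nlinarith [hr1le]
            calc (n : Int) * (m : Int)
                + (m : Int) * ((List.range n).countP (fun i => R.getD i false != b 0 0))
                = ((n * m + m * ((List.range n).countP
                    (fun i => R.getD i false != b 0 0)) : Nat) : Int) := by push_cast; ring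
              _ ≤ ((2 * n * m : Nat) : Int) := by exact_mod_cast h
              _ ≤ 10000000000000000000 := by exact_mod_cast hBIG
          rw [min_eq_right hC1le]
          congr 1 <;> push_cast <;> ring
      · have hMRf : (List.range n).any (fun k => R.getD k false) = false :=
          Bool.eq_false_iff.mpr hMR
        have hρall : ∀ i, i < n → R.getD i false = false := by
          intro i hi
          cases hri : R.getD i false
          · rfl
          · exact absurd (List.any_eq_true.mpr ⟨i, List.mem_range.mpr hi, hri⟩) hMR
        obtain ⟨hV1, hc1, hr1⟩ := pvS1_allEq n m b (fun k => R.getD k false) hn Hb hρall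
        by_cases hMA : (((List.range m).any (fun j => b 0 j))
            && ((List.range m).any (fun j => !(b 0 j)))) = true
        · -- all rows equal, mixed first row
          obtain ⟨hAT, hAF⟩ : ((List.range m).any (fun j => b 0 j)) = true ∧
              ((List.range m).any (fun j => !(b 0 j))) = true := by simpa using hMA
          obtain ⟨jT, hjTm, hjTv⟩ := List.any_eq_true.mp hAT
          obtain ⟨jF, hjFm, hjFv⟩ := List.any_eq_true.mp hAF
          have hT : ∃ j, j < m ∧ b 0 j = true := ⟨jT, List.mem_range.mp hjTm, hjTv⟩
          have hF : ∃ j, j < m ∧ b 0 j = false :=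
            ⟨jF, List.mem_range.mp hjFm, by simpa using hjFv⟩
          obtain ⟨hV2, hc2, hr2⟩ :=
            pvS2_mixedA_allEq n m b (fun k => R.getD k false) hn hm Hb hρall hT hF
          rw [hV1, hV2, hc1, hr1, hc2, hr2, hMRf, hMA]
          rw [if_neg (show ¬((!(true : Bool) && !(true : Bool)) = true) by simp),
              if_pos (rfl : (true : Bool) = true), if_pos (rfl : (true : Bool) = true),
              if_pos (show ((!(false : Bool)) = true) by simp),
              if_neg (show ¬((!(true : Bool)) = true) by simp),
              if_pos (show ((!(false : Bool)) = true) by simp)]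
          simp only [List.cons_append, List.nil_append]
          rw [PySem.List.min?_id_cons]
          simp only [List.foldl_cons, List.foldl_nil, Option.getD_some]
          have hc1le : (List.range m).countP (fun j => !(b 0 j)) ≤ m := by
            have h := List.countP_le_length (p := fun j => !(b 0 j)) (l := List.range m)
            simpa using h
          have hC1le : (n : Int) * ((List.range m).countP (fun j => !(b 0 j)))
              + (m : Int) * ((0 : Nat) : Int) ≤ 10000000000000000000 := by
            have h : n * ((List.range m).countP (fun j => !(b 0 j))) ≤ 2 * n * m := by
              nlinarith [hc1le]
            calc (n : Int) * ((List.range m).countP (fun j => !(b 0 j)))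
                + (m : Int) * ((0 : Nat) : Int)
                = ((n * ((List.range m).countP (fun j => !(b 0 j))) : Nat) : Int) := by
                  push_cast; ring
              _ ≤ ((2 * n * m : Nat) : Int) := by exact_mod_cast h
              _ ≤ 10000000000000000000 := by exact_mod_cast hBIG
          rw [min_eq_right hC1le]
          congr 1 <;> push_cast <;> ring
        · -- all rows equal, constant first row
          have hMAf : (((List.range m).any (fun j => b 0 j))
              && ((List.range m).any (fun j => !(b 0 j)))) = false := Bool.eq_false_iff.mpr hMA
          have hv : ∀ j < m, b 0 j = b 0 0 := by
            have hnand : ((List.range m).any (fun j => b 0 j)) = false ∨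
                ((List.range m).any (fun j => !(b 0 j))) = false := by
              cases hX : ((List.range m).any (fun j => b 0 j)) with
              | false => exact Or.inl rfl
              | true =>
                cases hY : ((List.range m).any (fun j => !(b 0 j))) with
                | false => exact Or.inr rfl
                | true => exact absurd (by simp [hX, hY]) hMA
            intro j hj
            rcases hnand with h | h
            · have hall : ∀ j' , j' < m → b 0 j' = false := by
                intro j' hj'
                cases hb' : b 0 j'
                · rfl
                · have h4 : (List.range m).any (fun j => b 0 j) = true :=
                    List.any_eq_true.mpr ⟨j', List.mem_range.mpr hj', hb'⟩
                  rw [h] at h4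
                  exact absurd h4 (by simp)
              rw [hall j hj, hall 0 hm]
            · have hall : ∀ j' , j' < m → b 0 j' = true := by
                intro j' hj'
                cases hb' : b 0 j'
                · have h4 : (List.range m).any (fun j => !(b 0 j)) = true :=
                    List.any_eq_true.mpr ⟨j', List.mem_range.mpr hj', by simp [hb']⟩
                  rw [h] at h4
                  exact absurd h4 (by simp)
                · rfl
              rw [hall j hj, hall 0 hm]
          obtain ⟨hV2, hc2, hr2⟩ := pvS2_const n m b (fun k => R.getD k false) hn hm Hb hv
          rw [hV1, hV2, hc1, hr1, hc2, hr2, hMRf, hMAf]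
          rw [if_neg (show ¬((!(true : Bool) && !(true : Bool)) = true) by simp),
              if_pos (rfl : (true : Bool) = true), if_pos (rfl : (true : Bool) = true),
              if_pos (show ((!(false : Bool)) = true) by simp),
              if_pos (show ((!(false : Bool)) = true) by simp)]
          simp only [List.cons_append, List.nil_append]
          rw [PySem.List.min?_id_cons]
          simp only [List.foldl_cons, List.foldl_nil, Option.getD_some]
          have hc1le : (List.range m).countP (fun j => !(b 0 j)) ≤ m := by
            have h := List.countP_le_length (p := fun j => !(b 0 j)) (l := List.range m)
            simpa using h
          have hC1le : (n : Int) * ((List.range m).countP (fun j => !(b 0 j)))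
              + (m : Int) * ((0 : Nat) : Int) ≤ 10000000000000000000 := by
            have h : n * ((List.range m).countP (fun j => !(b 0 j))) ≤ 2 * n * m := by
              nlinarith [hc1le]
            calc (n : Int) * ((List.range m).countP (fun j => !(b 0 j)))
                + (m : Int) * ((0 : Nat) : Int)
                = ((n * ((List.range m).countP (fun j => !(b 0 j))) : Nat) : Int) := by
                  push_cast; ring
              _ ≤ ((2 * n * m : Nat) : Int) := by exact_mod_cast h
              _ ≤ 10000000000000000000 := by exact_mod_cast hBIG
          rw [min_eq_right hC1le]
          congr 1 <;> push_cast <;> ring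

theorem solution_spec : Claim_equal_solution := by
  intro beginning target _hD hPre
  unfold Spec_solution
  obtain ⟨hne, -, hBIG⟩ := hPre
  have hn : 0 < target.length := by
    cases target with
    | nil => exact absurd rfl hne
    | cons h t => simp
  simp only [solution, solution_alt]
  rw [show (List.range target.length).map (fun i => (List.range (target.getD 0 []).length).map
        (fun j => if (target.getD i []).getD j 0 == (beginning.getD i []).getD j 0
          then (1 : Int) else 0))
      = pvMkA target.length (target.getD 0 []).length
          (fun i j => (beginning.getD i []).getD j 0 == (target.getD i []).getD j 0) from by
        unfold pvMkA
        apply List.map_congr_left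
        intro i _
        apply List.map_congr_left
        intro j _
        rw [pvBeqComm]]
  exact pvCore target.length (target.getD 0 []).length
    (fun i j => (beginning.getD i []).getD j 0 == (target.getD i []).getD j 0) hn hBIG
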